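-- pv_equiv track=rewrite | github.com/BadHard101/OzPractTaskD-4 | Ознакомительная папка/тема A/task_A275.py | list_of_sums
-- ===== SOURCE A (Python) =====
-- def list_of_sums(lst):
--     new_list = []
--     for i in range(2,len(lst)):
--         sum_pred=0
--         for j in range(0,i):
--             sum_pred+=lst[j]
--         if(sum_pred==lst[i]):
--             #print (lst[i-2],lst[i-1],lst[i])
--             new_list.append(lst[i])
--     #print (new_list)
--     return new_list
-- ===== SOURCE B (Python) =====
-- def list_of_sums(lst):
--     prefix = []
--     s = 0
--     for x in lst:
--         s += x
--         prefix.append(s)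
--     return [lst[i] for i in range(2, len(lst)) if prefix[i - 1] == lst[i]]
-- ===== Notes on version B (the rewrite author's own statement) =====
-- stated objective: faster
-- what changed: Replaces the quadratic inner rescan (re-summing lst[0:i] for every i) with a prefix-sum table built in one pass plus a single filtering comprehension over range(2, len(lst)).
import Mathlib
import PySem

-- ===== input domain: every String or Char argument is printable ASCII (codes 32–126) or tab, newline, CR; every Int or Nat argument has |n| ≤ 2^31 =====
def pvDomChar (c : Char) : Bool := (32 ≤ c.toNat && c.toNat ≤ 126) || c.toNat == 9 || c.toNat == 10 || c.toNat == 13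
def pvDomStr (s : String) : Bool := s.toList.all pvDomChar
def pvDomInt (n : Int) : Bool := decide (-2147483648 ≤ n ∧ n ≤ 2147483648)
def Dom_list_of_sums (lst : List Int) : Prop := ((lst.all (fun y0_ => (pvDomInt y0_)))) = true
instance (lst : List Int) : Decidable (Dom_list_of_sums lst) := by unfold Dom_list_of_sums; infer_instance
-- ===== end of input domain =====

-- B replaces A's quadratic inner rescan with a one-pass prefix-sum table plus one filtering pass (faster, O(n) vs O(n^2)).

-- ===== PORT A =====
def list_of_sums (lst : List Int) : List Int :=
  (PySem.List.pyRange 2 (PySem.List.len lst)).foldl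
    (fun new_list i =>
      let sum_pred : Int :=
        (PySem.List.pyRange 0 i).foldl (fun s j => s + PySem.List.pyGetD lst j 0) 0
      if sum_pred = PySem.List.pyGetD lst i 0 then new_list ++ [PySem.List.pyGetD lst i 0]
      else new_list) []

-- ===== PORT B =====
def list_of_sums_alt (lst : List Int) : List Int :=
  let p := lst.foldl (fun (q : List Int × Int) x => (q.1 ++ [q.2 + x], q.2 + x)) ([], 0)
  (PySem.List.pyRange 2 (PySem.List.len lst)).filterMap
    (fun i => if PySem.List.pyGetD p.1 (i - 1) 0 = PySem.List.pyGetD lst i 0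
              then some (PySem.List.pyGetD lst i 0) else none)

-- ===== PRECONDITION & SPEC =====
def Spec_list_of_sums (lst : List Int) (out : List Int) : Prop := out = list_of_sums_alt lst
instance (lst : List Int) (out : List Int) : Decidable (Spec_list_of_sums lst out) := by unfold Spec_list_of_sums; infer_instance

-- ===== CLAIM (what is proved, stated in full; the proofs are below) =====
def Claim_equal_list_of_sums : Prop := ∀ (lst : List Int), Dom_list_of_sums lst → Spec_list_of_sums lst (list_of_sums lst)

-- ===== LEMMAS AND PROOFS =====

-- A's append-if accumulator loop produces exactly B's filtering comprehension (Prop-valued `if`, bridging the two loop shapes).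
theorem foldl_if_append_eq_filterMap (p : Int → Prop) [DecidablePred p] (f : Int → Int)
    (l : List Int) (acc : List Int) :
    l.foldl (fun a x => if p x then a ++ [f x] else a) acc
      = acc ++ l.filterMap (fun x => if p x then some (f x) else none) := by
  induction l generalizing acc with
  | nil => simp
  | cons x xs ih => by_cases h : p x <;> simp [h, ih]

theorem map_getD_range_eq_take (lst : List Int) (k : Nat) (h : k ≤ lst.length) :
    (List.range k).map (fun j => lst.getD j 0) = lst.take k := by
  apply List.ext_getElem
  · simp [Nat.min_eq_left h]
  · intro i h1 h2
    simp at h1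
    simp [List.getD, List.getElem?_eq_getElem (by omega : i < lst.length)]

-- the prefix-list loop of B computes the table of sums of the first k+1 elements
theorem prefix_foldl_spec (lst : List Int) (acc : List Int) (s : Int) :
    (lst.foldl (fun (q : List Int × Int) x => (q.1 ++ [q.2 + x], q.2 + x)) (acc, s)).1
      = acc ++ (List.range lst.length).map (fun k => s + (lst.take (k + 1)).sum) := by
  induction lst generalizing acc s with
  | nil => simp
  | cons x xs ih =>
    simp only [List.foldl_cons, ih, List.length_cons, List.range_succ_eq_map,
      List.map_cons, List.map_map]
    simp [Function.comp, add_assoc]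

theorem list_of_sums_eq (lst : List Int) : list_of_sums lst = list_of_sums_alt lst := by
  unfold list_of_sums list_of_sums_alt
  rw [foldl_if_append_eq_filterMap
      (fun i => (PySem.List.pyRange 0 i).foldl (fun s j => s + PySem.List.pyGetD lst j 0) 0
                  = PySem.List.pyGetD lst i 0)
      (fun i => PySem.List.pyGetD lst i 0)]
  simp only [List.nil_append]
  apply List.filterMap_congr
  intro i hi
  have hmem := (PySem.List.mem_pyRange_one).1 hi
  simp only [PySem.List.len_eq] at hmem
  obtain ⟨h2, hlt⟩ := hmem
  -- i = ↑k with 2 ≤ k < lst.length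
  obtain ⟨k, rfl⟩ : ∃ k : Nat, i = (k : Int) := ⟨i.toNat, by omega⟩
  have hk2 : 2 ≤ k := by exact_mod_cast h2
  have hkl : k < lst.length := by exact_mod_cast hlt
  -- left side of the condition: A's inner rescan = sum of the first k elements
  have hA : (PySem.List.pyRange 0 (k : Int)).foldl
      (fun s j => s + PySem.List.pyGetD lst j 0) 0 = (lst.take k).sum := by
    rw [PySem.List.pyRange_zero_natCast, List.foldl_map]
    rw [PySem.List.foldl_add (List.range k) (fun j => PySem.List.pyGetD lst (j : Int) 0) 0]
    simp only [PySem.List.pyGetD_natCast]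
    rw [map_getD_range_eq_take lst k (by omega)]
    simp
  -- right side: B's prefix table entry at k-1 = sum of the first k elements
  have hB : PySem.List.pyGetD
      (lst.foldl (fun (q : List Int × Int) x => (q.1 ++ [q.2 + x], q.2 + x)) ([], 0)).1
      ((k : Int) - 1) 0 = (lst.take k).sum := by
    rw [prefix_foldl_spec lst [] 0]
    have : ((k : Int) - 1) = ((k - 1 : Nat) : Int) := by omega
    rw [this, PySem.List.pyGetD_natCast]
    simp only [List.nil_append]
    rw [List.getD_eq_getElem _ _ (by simpa using (by omega : k - 1 < lst.length))]
    simp only [List.getElem_map, List.getElem_range]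
    rw [Nat.sub_add_cancel (by omega)]
    simp
  rw [hA, hB]

-- ===== VERDICT (by name: the statement is the Claim_ definition above) =====
theorem list_of_sums_spec : Claim_equal_list_of_sums := by
  intro lst _
  unfold Spec_list_of_sums
  exact list_of_sums_eq lst
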